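-- pv_equiv track=rewrite | github.com/michu-dunat/communicator-server | server.py | delete_salt_from_password
-- ===== SOURCE A (Python) =====
-- def delete_salt_from_password(password):
--     first_letter = password[0]
--     unicode = ord(first_letter)
--     buforek = (unicode % 5) + 2
--     password_without_first_letter = password[1:]
--     password_without_salt = ""
--     for x in range(0, len(password_without_first_letter)):
--         if x % buforek == 0:
--             continue
--         else:
--             password_without_salt += password_without_first_letter[x]
--
--     return password_without_salt
-- ===== SOURCE B (Python) =====
-- def delete_salt_from_password(password):
--     buforek = (ord(password[0]) % 5) + 2
--     rest = password[1:]
--     pieces = []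
--     while rest:
--         pieces.append(rest[1:buforek])
--         rest = rest[buforek:]
--     return "".join(pieces)
-- ===== Notes on version B (the rewrite author's own statement) =====
-- stated objective: simpler
-- what changed: B replaces A's per-index loop with its mod test by a while loop that slices the tail into blocks of size buforek and keeps each block minus its first character; Pre_ excludes the empty password, on which A raises IndexError (and B does too).
import Mathlib
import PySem

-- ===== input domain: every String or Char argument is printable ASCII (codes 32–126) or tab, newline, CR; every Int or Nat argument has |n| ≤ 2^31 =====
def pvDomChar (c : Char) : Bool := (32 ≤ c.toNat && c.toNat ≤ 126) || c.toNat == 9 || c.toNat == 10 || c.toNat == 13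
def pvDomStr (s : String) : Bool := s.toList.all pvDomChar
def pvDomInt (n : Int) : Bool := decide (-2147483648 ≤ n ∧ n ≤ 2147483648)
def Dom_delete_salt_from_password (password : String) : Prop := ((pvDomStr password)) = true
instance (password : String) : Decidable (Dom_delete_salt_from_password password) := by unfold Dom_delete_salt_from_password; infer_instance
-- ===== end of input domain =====

-- B drops one character per block of size buforek by slicing, instead of A's per-index mod test (objective: simpler).
-- Both A and B raise IndexError on the empty password; Pre_ excludes exactly that input.

-- ===== PORT A =====
-- literal transliteration: password[0] raises on "", handled by Pre_; password[1:] is the tail;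
-- the loop index x is always in range, so rest.getD x ' ' is exactly password_without_first_letter[x].
def delete_salt_from_password (password : String) : String :=
  match password.toList with
  | [] => ""   -- password[0]: IndexError, excluded by Pre_
  | first_letter :: rest =>
    let unicode := first_letter.toNat
    let buforek := unicode % 5 + 2
    let out := (List.range rest.length).foldl
      (fun acc x => if x % buforek = 0 then acc else acc ++ [rest.getD x ' ']) []
    String.ofList out

-- ===== PORT B =====
-- the while loop of Source B: each iteration appends rest[1:buforek] and sets rest = rest[buforek:];
-- the b = 0 disjunct is a totality guard only (buforek ≥ 2 at the call site).
def chunksB (b : Nat) (rest : List Char) : List Char :=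
  if rest.isEmpty || b == 0 then []
  else (rest.drop 1).take (b - 1) ++ chunksB b (rest.drop b)
termination_by rest.length
decreasing_by
  rename_i h
  simp only [Bool.or_eq_true, List.isEmpty_iff, beq_iff_eq] at h
  push_neg at h
  have h1 : 0 < rest.length := List.length_pos_iff.mpr h.1
  simp only [List.length_drop]
  omega

def delete_salt_from_password_alt (password : String) : String :=
  match password.toList with
  | [] => ""   -- ord(password[0]): IndexError, excluded by Pre_
  | first :: rest =>
    let buforek := first.toNat % 5 + 2
    String.ofList (chunksB buforek rest)

-- ===== PRECONDITION & SPEC =====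
-- A raises IndexError on the empty password (password[0]); excluded.
def Pre_delete_salt_from_password (password : String) : Prop := password ≠ ""
instance (password : String) : Decidable (Pre_delete_salt_from_password password) := by unfold Pre_delete_salt_from_password; infer_instance
def pvWitness_delete_salt_from_password : String := "abcdefg"

def Spec_delete_salt_from_password (password : String) (out : String) : Prop := out = delete_salt_from_password_alt password
instance (password : String) (out : String) : Decidable (Spec_delete_salt_from_password password out) := by unfold Spec_delete_salt_from_password; infer_instance

-- ===== CLAIM (what is proved, stated in full; the proofs are below) =====
def Claim_equal_delete_salt_from_password : Prop := ∀ (password : String), Dom_delete_salt_from_password password → Pre_delete_salt_from_password password → Spec_delete_salt_from_password password (delete_salt_from_password password)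

-- ===== LEMMAS AND PROOFS =====

-- A's loop as filter/map over the index range
theorem foldlA_eq_filter_map (b : Nat) (f : Nat → Char) (l : List Nat) (acc : List Char) :
    l.foldl (fun acc x => if x % b = 0 then acc else acc ++ [f x]) acc
      = acc ++ (l.filter (fun x => !(x % b == 0))).map f := by
  induction l generalizing acc with
  | nil => simp
  | cons y ys ih =>
    by_cases h : y % b = 0 <;> simp [h, ih, List.append_assoc]

theorem map_getD_range_eq_take (l : List Char) (m : Nat) (hm : m ≤ l.length) :
    (List.range m).map (fun x => l.getD x ' ') = l.take m := by
  apply List.ext_getElem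
  · simp [hm]
  · intro i h1 h2
    simp only [List.getElem_map, List.getElem_range, List.getElem_take]
    rw [List.getD_eq_getElem?_getD, List.getElem?_eq_getElem (by simp at h1; omega)]
    simp

-- key characterization: A's filtered index scan equals B's block recursion
theorem filter_map_eq_chunksB (b : Nat) (hb : 0 < b) (rest : List Char) :
    ((List.range rest.length).filter (fun x => !(x % b == 0))).map (fun x => rest.getD x ' ')
      = chunksB b rest := by
  induction hn : rest.length using Nat.strong_induction_on generalizing rest with
  | _ n ih =>
  subst hn
  rcases List.eq_nil_or_concat rest with h | _
  · subst h; simp [chunksB]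
  have hne : rest ≠ [] := by rintro rfl; simp_all
  have hpos : 0 < rest.length := List.length_pos_iff.mpr hne
  rw [chunksB]
  simp only [List.isEmpty_iff, hne, if_neg, Bool.or_eq_true, beq_iff_eq]
  rw [if_neg (by simp [hne]; omega)]
  -- split the index range at min b n
  have hsplit : List.range rest.length
      = List.range (min b rest.length) ++ (List.range (rest.length - b)).map (b + ·) := by
    by_cases h : rest.length ≤ b
    · have h0 : rest.length - b = 0 := by omega
      simp [h0, Nat.min_eq_right h]
    · have heq : rest.length = b + (rest.length - b) := by omega
      rw [Nat.min_eq_left (by omega)]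
      conv_lhs => rw [heq, List.range_add]
  rw [hsplit, List.filter_append, List.map_append]
  congr 1
  · -- low part: indices 1 .. min b n - 1 give (rest.drop 1).take (b-1)
    have hlow : (List.range (min b rest.length)).filter (fun x => !(x % b == 0))
        = (List.range (min b rest.length - 1)).map (· + 1) := by
      have hmpos : 0 < min b rest.length := by omega
      have hfil : List.filter ((fun x => !(x % b == 0)) ∘ Nat.succ)
          (List.range (min b rest.length - 1)) = List.range (min b rest.length - 1) := by
        apply List.filter_eq_self.mpr
        intro a ha
        have haR : a < min b rest.length - 1 := List.mem_range.mp ha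
        have hmod : (a + 1) % b = a + 1 := Nat.mod_eq_of_lt (by omega)
        simp [Nat.succ_eq_add_one, hmod]
      have hm : min b rest.length = (min b rest.length - 1) + 1 := by omega
      conv_lhs => rw [hm]
      rw [List.range_succ_eq_map, List.filter_cons]
      simp only [Nat.zero_mod, beq_self_eq_true, Bool.not_true, Bool.false_eq_true, reduceIte]
      rw [List.filter_map, hfil]
    rw [hlow, List.map_map]
    have h1 : (fun x => rest.getD x ' ') ∘ (· + 1) = fun x => (rest.drop 1).getD x ' ' := by
      funext x
      rw [Function.comp_apply, List.getD_eq_getElem?_getD, List.getD_eq_getElem?_getD,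
        List.getElem?_drop, Nat.add_comm]
    rw [h1, map_getD_range_eq_take _ _ (by simp only [List.length_drop]; omega)]
    exact List.take_eq_take_iff.mpr (by simp only [List.length_drop]; omega)
  · -- high part: indices b + y give the recursion on rest.drop b
    have hcomm : (fun x => !(x % b == 0)) ∘ (b + ·) = (fun x => !(x % b == 0)) := by
      funext y
      show (!((b + y) % b == 0)) = (!(y % b == 0))
      rw [Nat.add_mod_left]
    rw [List.filter_map, hcomm, List.map_map]
    have h2 : (fun x => rest.getD x ' ') ∘ (b + ·) = fun y => (rest.drop b).getD y ' ' := by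
      funext y
      rw [Function.comp_apply, List.getD_eq_getElem?_getD, List.getD_eq_getElem?_getD,
        List.getElem?_drop]
    rw [h2]
    have hlen : (rest.drop b).length = rest.length - b := by simp
    rw [← hlen]
    exact ih (rest.drop b).length (by simp; omega) (rest.drop b) rfl

-- ===== VERDICT (by name: the statement is the Claim_ definition above) =====
theorem delete_salt_from_password_spec : Claim_equal_delete_salt_from_password := by
  intro password _ hpre
  unfold Spec_delete_salt_from_password delete_salt_from_password delete_salt_from_password_alt
  have hne : password.toList ≠ [] := by
    intro h
    apply hpre
    have := congrArg String.ofList h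
    simpa using this
  cases hl : password.toList with
  | nil => exact absurd hl hne
  | cons first rest =>
    simp only
    rw [foldlA_eq_filter_map, List.nil_append,
      filter_map_eq_chunksB (first.toNat % 5 + 2) (by omega) rest]
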